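-- pv_equiv track=rewrite | github.com/wavestoweather/AD_Sensitivity_Analysis | ad_sensitivity_analysis/plot/latexify.py | replace_cites
-- ===== SOURCE A (Python) =====
-- def replace_cites(str_to_replace):
--     r"""
--
--     Parameters
--     ----------
--     str_to_replace : string
--         String with occurrences of the form of \citeA{...}
--     Returns
--     -------
--     Replaced the \citeA with the name of the citation.
--     """
--     cite_dic = {
--         r"\citeA{seifert_two-moment_2006}": "Seifert and Beheng (2006a)",
--         r"\citeA{seifert_parameterization_2008}": "Seifert (2008)",
--         r"\citeA{hande_parameterizing_2016}": "Hande et al. (2016)",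
--         r"\citeA{phillips_empirical_2008}": "Phillips et al. (2008)",
--         r"\citeA{hallett_production_1974}": "Hallet and Mossop (1974)",
--         r"\citeA{seifert_parametrisierung_2002}": "Seifert (2002)",
--         r"\citeA{seifert_double-moment_2001}": "Seifert and Beheng (2001)",
--         r"\citeA{karcher_physically_2006}": r"Kärcher et al. (2006)",
--     }
--     for key, replacement in cite_dic.items():
--         if key in str_to_replace:
--             str_to_replace = str_to_replace.replace(key, replacement)
--     return str_to_replace
-- ===== SOURCE B (Python) =====
-- def replace_cites(str_to_replace):
--     r"""Single left-to-right scan: at each backslash, try the citation keys once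
--     and emit the citation name, instead of one whole-string replace pass per key."""
--     cite_dic = {
--         r"\citeA{seifert_two-moment_2006}": "Seifert and Beheng (2006a)",
--         r"\citeA{seifert_parameterization_2008}": "Seifert (2008)",
--         r"\citeA{hande_parameterizing_2016}": "Hande et al. (2016)",
--         r"\citeA{phillips_empirical_2008}": "Phillips et al. (2008)",
--         r"\citeA{hallett_production_1974}": "Hallet and Mossop (1974)",
--         r"\citeA{seifert_parametrisierung_2002}": "Seifert (2002)",
--         r"\citeA{seifert_double-moment_2001}": "Seifert and Beheng (2001)",
--         r"\citeA{karcher_physically_2006}": r"Kärcher et al. (2006)",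
--     }
--     out = []
--     i = 0
--     n = len(str_to_replace)
--     while i < n:
--         c = str_to_replace[i]
--         if c == "\\":
--             for key, replacement in cite_dic.items():
--                 if str_to_replace.startswith(key, i):
--                     out.append(replacement)
--                     i += len(key)
--                     break
--             else:
--                 out.append(c)
--                 i += 1
--         else:
--             out.append(c)
--             i += 1
--     return "".join(out)
-- ===== Notes on version B (the rewrite author's own statement) =====
-- stated objective: alternative
-- what changed: Replaced the eight sequential whole-string .replace passes (one per citation key) with a single left-to-right scan that, at each backslash, tries the keys once and emits the citation name directly.
import Mathlib
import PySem

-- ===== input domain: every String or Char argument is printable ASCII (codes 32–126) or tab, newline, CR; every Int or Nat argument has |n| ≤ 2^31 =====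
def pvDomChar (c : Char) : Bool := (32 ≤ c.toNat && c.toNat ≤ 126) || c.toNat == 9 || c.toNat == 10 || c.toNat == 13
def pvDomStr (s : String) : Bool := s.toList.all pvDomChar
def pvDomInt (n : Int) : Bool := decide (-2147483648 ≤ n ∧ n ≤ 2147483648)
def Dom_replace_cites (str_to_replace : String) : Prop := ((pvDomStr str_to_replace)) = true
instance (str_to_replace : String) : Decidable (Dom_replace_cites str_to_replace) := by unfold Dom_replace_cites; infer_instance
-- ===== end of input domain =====

-- B replaces A's eight sequential whole-string `.replace` passes by a single left-to-right
-- scan that tries the citation keys at each backslash (alternative decomposition, same result).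

-- ===== PORT A =====
-- the dict literal of A (distinct keys, so .items() is this list in insertion order)
def citeDic : List (String × String) := [
  ("\\citeA{seifert_two-moment_2006}", "Seifert and Beheng (2006a)"),
  ("\\citeA{seifert_parameterization_2008}", "Seifert (2008)"),
  ("\\citeA{hande_parameterizing_2016}", "Hande et al. (2016)"),
  ("\\citeA{phillips_empirical_2008}", "Phillips et al. (2008)"),
  ("\\citeA{hallett_production_1974}", "Hallet and Mossop (1974)"),
  ("\\citeA{seifert_parametrisierung_2002}", "Seifert (2002)"),
  ("\\citeA{seifert_double-moment_2001}", "Seifert and Beheng (2001)"),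
  ("\\citeA{karcher_physically_2006}", "Kärcher et al. (2006)")]

-- A: for key, replacement in cite_dic.items(): if key in s: s = s.replace(key, replacement)
def replace_cites (str_to_replace : String) : String :=
  citeDic.foldl
    (fun s kv => if PySem.Str.isIn kv.1 s then PySem.Str.replace s kv.1 kv.2 else s)
    str_to_replace

-- ===== PORT B =====
-- B's dict, on the List Char side (same pairs)
def citesB : List (List Char × List Char) := [
  ("\\citeA{seifert_two-moment_2006}".toList, "Seifert and Beheng (2006a)".toList),
  ("\\citeA{seifert_parameterization_2008}".toList, "Seifert (2008)".toList),
  ("\\citeA{hande_parameterizing_2016}".toList, "Hande et al. (2016)".toList),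
  ("\\citeA{phillips_empirical_2008}".toList, "Phillips et al. (2008)".toList),
  ("\\citeA{hallett_production_1974}".toList, "Hallet and Mossop (1974)".toList),
  ("\\citeA{seifert_parametrisierung_2002}".toList, "Seifert (2002)".toList),
  ("\\citeA{seifert_double-moment_2001}".toList, "Seifert and Beheng (2001)".toList),
  ("\\citeA{karcher_physically_2006}".toList, "Kärcher et al. (2006)".toList)]

-- B's while-loop: at a backslash try the keys (first match wins), else copy the character
def scanGo : List Char → List Char
  | [] => []
  | c :: t =>
    if c = '\\' then
      match citesB.find? (fun kv => kv.1.isPrefixOf (c :: t)) with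
      | some kv => kv.2 ++ scanGo (t.drop (kv.1.length - 1))
      | none => c :: scanGo t
    else c :: scanGo t
termination_by l => l.length
decreasing_by
  · simp only [List.length_cons, List.length_drop]; omega
  · simp
  · simp

def replace_cites_alt (str_to_replace : String) : String :=
  String.ofList (scanGo str_to_replace.toList)

-- ===== PRECONDITION & SPEC =====
def Spec_replace_cites (str_to_replace : String) (out : String) : Prop := out = replace_cites_alt str_to_replace
instance (str_to_replace : String) (out : String) : Decidable (Spec_replace_cites str_to_replace out) := by unfold Spec_replace_cites; infer_instance

-- ===== CLAIM (what is proved, stated in full; the proofs are below) =====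
def Claim_equal_replace_cites : Prop := ∀ (str_to_replace : String), Dom_replace_cites str_to_replace → Spec_replace_cites str_to_replace (replace_cites str_to_replace)

-- ===== LEMMAS AND PROOFS =====

-- one whole-string replace pass for a single key, as a scan (reference form of str.replace)
def scanOne (key rep : List Char) : List Char → List Char
  | [] => []
  | c :: t =>
    if key.isPrefixOf (c :: t) then rep ++ scanOne key rep (t.drop (key.length - 1))
    else c :: scanOne key rep t
termination_by l => l.length
decreasing_by
  · simp only [List.length_cons, List.length_drop]; omega
  · simp

-- A's fold, on the List Char side
def compFrom (ps : List (List Char × List Char)) (s : List Char) : List Char :=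
  ps.foldl (fun acc kv => scanOne kv.1 kv.2 acc) s

def RepHeads : List Char := ['S', 'H', 'P', 'K']

-- concrete facts about the eight pairs, checked by kernel computation (rfl on Bool)
lemma citesB_eq_map : citesB = citeDic.map (fun kv => (kv.1.toList, kv.2.toList)) := rfl

lemma fact_pairs_b : citesB.all (fun kv =>
    (kv.1.head? == some '\\') && kv.1.tail.all (fun c => c != '\\') &&
    kv.1.all (fun c => !(RepHeads.contains c)) && !kv.2.isEmpty &&
    kv.2.head?.all (fun c => RepHeads.contains c) && kv.2.all (fun c => c != '\\')) = true := rfl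

lemma fact_pairs : ∀ kv ∈ citesB,
    kv.1.head? = some '\\' ∧ (∀ c ∈ kv.1.tail, c ≠ '\\') ∧ (∀ c ∈ kv.1, c ∉ RepHeads) ∧
    kv.2 ≠ [] ∧ (∀ c, kv.2.head? = some c → c ∈ RepHeads) ∧ (∀ c ∈ kv.2, c ≠ '\\') := by
  intro kv hm
  have h := List.all_eq_true.mp fact_pairs_b kv hm
  simp only [Bool.and_eq_true, beq_iff_eq, List.all_eq_true, bne_iff_ne, ne_eq,
    Bool.not_eq_eq_eq_not, Bool.not_true, List.contains_eq_mem, decide_eq_false_iff_not,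
    List.isEmpty_eq_false_iff, Option.all_eq_true] at h
  obtain ⟨⟨⟨⟨⟨h1, h2⟩, h3⟩, h4⟩, h5⟩, h6⟩ := h
  exact ⟨h1, h2, h3, h4, fun c hc => by have := h5; simp [hc] at this; simpa using this, h6⟩

lemma fact_nopref_b : citesB.all (fun kv => citesB.all (fun kv' =>
    (kv.1 == kv'.1) || !(kv.1.isPrefixOf kv'.1))) = true := rfl

lemma fact_nopref : ∀ kv ∈ citesB, ∀ kv' ∈ citesB, kv.1 ≠ kv'.1 → ¬ kv.1 <+: kv'.1 := by
  intro kv hm kv' hm' hne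
  have h := List.all_eq_true.mp (List.all_eq_true.mp fact_nopref_b kv hm) kv' hm'
  simp only [Bool.or_eq_true, beq_iff_eq, Bool.not_eq_eq_eq_not, Bool.not_true] at h
  rcases h with h | h
  · exact absurd h hne
  · intro hp; rw [← List.isPrefixOf_iff_prefix] at hp; simp [h] at hp

lemma fact_keyinj_b : citesB.all (fun kv => citesB.all (fun kv' =>
    !(kv.1 == kv'.1) || (kv == kv'))) = true := rfl

lemma fact_keyinj : ∀ kv ∈ citesB, ∀ kv' ∈ citesB, kv.1 = kv'.1 → kv = kv' := by
  intro kv hm kv' hm' he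
  have h := List.all_eq_true.mp (List.all_eq_true.mp fact_keyinj_b kv hm) kv' hm'
  simp only [Bool.or_eq_true, beq_iff_eq, Bool.not_eq_eq_eq_not, Bool.not_true] at h
  rcases h with h | h
  · simp only [beq_eq_false_iff_ne, ne_eq] at h; exact absurd he h
  · exact h

def keysDistinct : List (List Char) → Bool
  | [] => true
  | k :: ks => ks.all (fun k' => k' != k) && keysDistinct ks

lemma keysDistinct_citesB : keysDistinct (citesB.map Prod.fst) = true := rfl

lemma nodup_of_keysDistinct : ∀ l : List (List Char), keysDistinct l = true → l.Nodup := by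
  intro l
  induction l with
  | nil => intro _; exact List.nodup_nil
  | cons k ks ih =>
    intro h
    simp only [keysDistinct, Bool.and_eq_true, List.all_eq_true, bne_iff_ne, ne_eq] at h
    exact List.nodup_cons.2 ⟨fun hmem => h.1 k hmem rfl, ih h.2⟩

lemma fact_nodup : (citesB.map Prod.fst).Nodup :=
  nodup_of_keysDistinct _ keysDistinct_citesB

-- scanOne equations
lemma scanOne_nil (key rep : List Char) : scanOne key rep [] = [] := by rw [scanOne]

lemma scanOne_pos {key : List Char} (rep : List Char) {c : Char} {t : List Char}
    (h : key <+: c :: t) :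
    scanOne key rep (c :: t) = rep ++ scanOne key rep (t.drop (key.length - 1)) := by
  rw [scanOne]; simp [List.isPrefixOf_iff_prefix.2 h]

lemma scanOne_neg {key : List Char} (rep : List Char) {c : Char} {t : List Char}
    (h : ¬ key <+: c :: t) :
    scanOne key rep (c :: t) = c :: scanOne key rep t := by
  rw [scanOne]
  simp only [List.isPrefixOf_iff_prefix]
  rw [if_neg h]

-- scanOne never matches ⇒ identity
lemma scanOne_id {key rep s : List Char} (h : ∀ j, ¬ key <+: s.drop j) :
    scanOne key rep s = s := by
  induction s with
  | nil => exact scanOne_nil _ _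
  | cons c t ih =>
    rw [scanOne_neg rep (by simpa using h 0)]
    exact congrArg (c :: ·) (ih fun j => by simpa using h (j + 1))

-- matching step on an explicit key prefix
lemma scanOne_key {key : List Char} (rep : List Char) (u : List Char) (hk : key ≠ []) :
    scanOne key rep (key ++ u) = rep ++ scanOne key rep u := by
  obtain ⟨c, kt, rfl⟩ := List.exists_cons_of_ne_nil hk
  rw [List.cons_append, scanOne_pos rep (by simp [List.prefix_append])]
  simp

-- copying: a backslash-free prefix passes through scanOne untouched
lemma scanOne_copy {key : List Char} (rep : List Char) (hh : key.head? = some '\\')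
    (p u : List Char) (hp : ∀ c ∈ p, c ≠ '\\') :
    scanOne key rep (p ++ u) = p ++ scanOne key rep u := by
  induction p with
  | nil => rfl
  | cons d p' ih =>
    have hne : ¬ key <+: d :: (p' ++ u) := by
      intro hpre
      obtain ⟨kt, rfl⟩ : ∃ kt, key = '\\' :: kt := by
        cases key with
        | nil => simp at hh
        | cons a kt => simp only [List.head?_cons, Option.some.injEq] at hh; exact ⟨kt, by rw [hh]⟩
      exact hp d (by simp) ((List.cons_prefix_cons.1 hpre).1).symm
    rw [List.cons_append, scanOne_neg rep hne, ih (fun c hc => hp c (by simp [hc]))]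
    rfl

-- another key's prefix also passes through untouched
lemma scanOne_keep {kv kv' : List Char × List Char} (hm : kv ∈ citesB) (hm' : kv' ∈ citesB)
    (hne : kv.1 ≠ kv'.1) (u : List Char) :
    scanOne kv'.1 kv'.2 (kv.1 ++ u) = kv.1 ++ scanOne kv'.1 kv'.2 u := by
  obtain ⟨hh, htail, -, -, -, -⟩ := fact_pairs kv hm
  obtain ⟨hh', -, -, -, -, -⟩ := fact_pairs kv' hm'
  obtain ⟨kt, hkt⟩ : ∃ kt, kv.1 = '\\' :: kt := by
    cases hcase : kv.1 with
    | nil => rw [hcase] at hh; simp at hh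
    | cons a kt => rw [hcase] at hh; simp only [List.head?_cons, Option.some.injEq] at hh;
                   exact ⟨kt, by rw [hh]⟩
  have hnp : ¬ kv'.1 <+: kv.1 ++ u := by
    intro h
    rcases List.prefix_or_prefix_of_prefix h (List.prefix_append kv.1 u) with h1 | h1
    · exact fact_nopref kv' hm' kv hm (fun e => hne e.symm) h1
    · exact fact_nopref kv hm kv' hm' hne h1
  rw [hkt, List.cons_append, scanOne_neg kv'.2 (by rw [hkt, List.cons_append] at hnp; exact hnp),
    scanOne_copy kv'.2 hh' kt u (fun c hc => htail c (by rw [hkt]; exact hc))]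
  simp

-- no new key fragment is created by a scanOne pass
lemma scanOne_frag {kv : List Char × List Char} (hm : kv ∈ citesB) :
    ∀ u f : List Char, (∀ c ∈ f, c ∉ RepHeads) → f <+: scanOne kv.1 kv.2 u → f <+: u := by
  obtain ⟨-, -, -, hr, hrh, -⟩ := fact_pairs kv hm
  have main : ∀ n (u f : List Char), u.length ≤ n →
      (∀ c ∈ f, c ∉ RepHeads) → f <+: scanOne kv.1 kv.2 u → f <+: u := by
    intro n
    induction n with
    | zero =>
      intro u f hu hf hpre
      rw [List.length_eq_zero_iff.1 (Nat.le_zero.1 hu)] at hpre ⊢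
      rwa [scanOne_nil] at hpre
    | succ n ih =>
      intro u f hu hf hpre
      cases u with
      | nil => rwa [scanOne_nil] at hpre
      | cons c t =>
        by_cases hp : kv.1 <+: c :: t
        · rw [scanOne_pos _ hp] at hpre
          cases f with
          | nil => exact List.nil_prefix
          | cons fc ft =>
            obtain ⟨rc, rt, hrct⟩ := List.exists_cons_of_ne_nil hr
            rw [hrct, List.cons_append] at hpre
            have : fc = rc := (List.cons_prefix_cons.1 hpre).1
            have hin : rc ∈ RepHeads := hrh rc (by rw [hrct]; rfl)
            exact absurd (this ▸ hin) (hf fc (by simp))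
        · rw [scanOne_neg _ hp] at hpre
          cases f with
          | nil => exact List.nil_prefix
          | cons fc ft =>
            obtain ⟨he, hft⟩ := List.cons_prefix_cons.1 hpre
            have := ih t ft (by simpa using Nat.le_of_succ_le_succ hu)
              (fun c hc => hf c (by simp [hc])) hft
            exact List.cons_prefix_cons.2 ⟨he, this⟩
  exact fun u f => main u.length u f le_rfl

-- compFrom basics
lemma compFrom_cons (kv : List Char × List Char) (ps : List (List Char × List Char))
    (s : List Char) : compFrom (kv :: ps) s = compFrom ps (scanOne kv.1 kv.2 s) := rfl

lemma compFrom_append (ps qs : List (List Char × List Char)) (s : List Char) :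
    compFrom (ps ++ qs) s = compFrom qs (compFrom ps s) := by
  simp [compFrom, List.foldl_append]

lemma compFrom_nil (ps : List (List Char × List Char)) : compFrom ps [] = [] := by
  induction ps with
  | nil => rfl
  | cons kv ps ih => rw [compFrom_cons, scanOne_nil]; exact ih

lemma compFrom_copy {ps : List (List Char × List Char)} (hps : ∀ kv ∈ ps, kv ∈ citesB)
    {p : List Char} (hp : ∀ c ∈ p, c ≠ '\\') :
    ∀ u, compFrom ps (p ++ u) = p ++ compFrom ps u := by
  induction ps with
  | nil => intro u; rfl
  | cons kv ps ih =>
    intro u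
    obtain ⟨hh, -, -, -, -, -⟩ := fact_pairs kv (hps kv (by simp))
    rw [compFrom_cons, scanOne_copy kv.2 hh p u hp, ih (fun kv' h => hps kv' (by simp [h]))]
    rfl

lemma compFrom_keep {ps : List (List Char × List Char)} {kv : List Char × List Char}
    (hm : kv ∈ citesB) (hps : ∀ kv' ∈ ps, kv' ∈ citesB ∧ kv'.1 ≠ kv.1) :
    ∀ u, compFrom ps (kv.1 ++ u) = kv.1 ++ compFrom ps u := by
  induction ps with
  | nil => intro u; rfl
  | cons kv' ps ih =>
    intro u
    obtain ⟨hm', hne⟩ := hps kv' (by simp)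
    rw [compFrom_cons, scanOne_keep hm hm' (fun e => hne e.symm) u,
      ih (fun kv'' h => hps kv'' (by simp [h]))]
    rfl

lemma compFrom_nomatch {ps : List (List Char × List Char)} (hps : ∀ kv ∈ ps, kv ∈ citesB)
    {c : Char} : ∀ {t : List Char}, (∀ kv ∈ citesB, ¬ kv.1 <+: c :: t) →
    compFrom ps (c :: t) = c :: compFrom ps t := by
  induction ps with
  | nil => intro t _; rfl
  | cons kv₀ ps ih =>
    intro t h
    have hm₀ : kv₀ ∈ citesB := hps kv₀ (by simp)
    rw [compFrom_cons, scanOne_neg kv₀.2 (h kv₀ hm₀)]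
    have hnext : ∀ kv ∈ citesB, ¬ kv.1 <+: c :: scanOne kv₀.1 kv₀.2 t := by
      intro kv hkv hpre
      obtain ⟨hh, -, hnorep, -, -, -⟩ := fact_pairs kv hkv
      obtain ⟨kc, f, hkf⟩ : ∃ kc f, kv.1 = kc :: f := by
        cases hcase : kv.1 with
        | nil => rw [hcase] at hh; simp at hh
        | cons a b => exact ⟨a, b, rfl⟩
      rw [hkf, List.cons_prefix_cons] at hpre
      have hfrag := scanOne_frag hm₀ t f
        (fun ch hch => hnorep ch (by rw [hkf]; simp [hch])) hpre.2
      exact h kv hkv (by rw [hkf]; exact List.cons_prefix_cons.2 ⟨hpre.1, hfrag⟩)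
    rw [compFrom_cons, ih (fun kv' hk => hps kv' (by simp [hk])) hnext]

-- scanGo equations
lemma scanGo_nil : scanGo [] = [] := by rw [scanGo]

lemma find?_first {kv : List Char × List Char} {s : List Char} (hpre : kv.1 <+: s) :
    ∀ l : List (List Char × List Char), (∀ kv' ∈ l, kv' ∈ citesB) → kv ∈ citesB → kv ∈ l →
      l.find? (fun kv' => kv'.1.isPrefixOf s) = some kv := by
  intro l
  induction l with
  | nil => intro _ _ h; simp at h
  | cons kv₀ l ih =>
    intro hl hmc hm
    by_cases hb : kv₀.1 <+: s
    · have hm₀ : kv₀ ∈ citesB := hl kv₀ (by simp)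
      have hkeys : kv₀.1 = kv.1 := by
        by_contra hne
        rcases List.prefix_or_prefix_of_prefix hb hpre with h1 | h1
        · rcases eq_or_ne kv₀.1 kv.1 with h2 | h2
          · exact hne h2
          · exact fact_nopref kv₀ hm₀ kv hmc h2 h1
        · exact fact_nopref kv hmc kv₀ hm₀ (fun e => hne e.symm) h1
      have : kv₀ = kv := fact_keyinj kv₀ hm₀ kv hmc hkeys
      rw [List.find?_cons_of_pos (by simpa [List.isPrefixOf_iff_prefix] using hb), this]
    · have : kv ∈ l := by
        rcases List.mem_cons.1 hm with h | h
        · exact absurd (h ▸ hpre) hb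
        · exact h
      rw [List.find?_cons_of_neg (by simpa [List.isPrefixOf_iff_prefix] using hb)]
      exact ih (fun kv' h => hl kv' (by simp [h])) hmc this

lemma scanGo_match {kv : List Char × List Char} (hm : kv ∈ citesB) {s : List Char}
    (hpre : kv.1 <+: s) (w : List Char) (hw : s = kv.1 ++ w) :
    scanGo s = kv.2 ++ scanGo w := by
  obtain ⟨hh, -, -, -, -, -⟩ := fact_pairs kv hm
  obtain ⟨kt, hkt⟩ : ∃ kt, kv.1 = '\\' :: kt := by
    cases hcase : kv.1 with
    | nil => rw [hcase] at hh; simp at hh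
    | cons a b => rw [hcase] at hh; simp only [List.head?_cons, Option.some.injEq] at hh
                  exact ⟨b, by rw [hh]⟩
  have hs : s = '\\' :: (kt ++ w) := by rw [hw, hkt]; rfl
  have hfind : citesB.find? (fun kv' => kv'.1.isPrefixOf ('\\' :: (kt ++ w))) = some kv := by
    rw [← hs]; exact find?_first hpre citesB (fun kv' h => h) hm hm
  rw [hs, scanGo, if_pos rfl, hfind]
  have hdrop : (kt ++ w).drop (kv.1.length - 1) = w := by
    rw [hkt]; simp only [List.length_cons, Nat.add_sub_cancel]; exact List.drop_left
  show kv.2 ++ scanGo (List.drop (kv.1.length - 1) (kt ++ w)) = kv.2 ++ scanGo w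
  rw [hdrop]

lemma scanGo_nomatch {c : Char} {t : List Char} (h : ∀ kv ∈ citesB, ¬ kv.1 <+: c :: t) :
    scanGo (c :: t) = c :: scanGo t := by
  rw [scanGo]
  by_cases hc : c = '\\'
  · rw [if_pos hc]
    have : citesB.find? (fun kv => kv.1.isPrefixOf (c :: t)) = none :=
      List.find?_eq_none.2 (fun kv hkv => by
        simpa [List.isPrefixOf_iff_prefix] using h kv hkv)
    rw [this]
  · rw [if_neg hc]

-- the main bridge: A's eight passes = B's single scan
lemma compFrom_eq_scanGo : ∀ s : List Char, compFrom citesB s = scanGo s := by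
  have main : ∀ n (s : List Char), s.length ≤ n → compFrom citesB s = scanGo s := by
    intro n
    induction n with
    | zero =>
      intro s hs
      rw [List.length_eq_zero_iff.1 (Nat.le_zero.1 hs), compFrom_nil, scanGo_nil]
    | succ n ih =>
      intro s hs
      cases s with
      | nil => rw [compFrom_nil, scanGo_nil]
      | cons c t =>
        by_cases hex : ∃ kv ∈ citesB, kv.1 <+: c :: t
        · obtain ⟨kv, hm, hpre⟩ := hex
          obtain ⟨w, hw⟩ := hpre
          obtain ⟨hh, -, -, -, -, hrep⟩ := fact_pairs kv hm
          have hknil : kv.1 ≠ [] := by intro h; rw [h] at hh; simp at hh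
          obtain ⟨l₁, l₂, hsplit⟩ := List.append_of_mem hm
          have hsub : ∀ kv' ∈ l₁, kv' ∈ citesB := fun kv' h => by
            rw [hsplit]; exact List.mem_append_left _ h
          have hsub₂ : ∀ kv' ∈ l₂, kv' ∈ citesB := fun kv' h => by
            exact hsplit ▸ List.mem_append_right _ (List.mem_cons_of_mem _ h)
          have hnotin : kv.1 ∉ l₁.map Prod.fst := by
            have hnd := fact_nodup
            rw [hsplit, List.map_append, List.map_cons, List.nodup_append] at hnd
            intro hmem
            exact hnd.2.2 kv.1 hmem kv.1 (List.mem_cons_self ..) rfl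
          have hne₁ : ∀ kv' ∈ l₁, kv' ∈ citesB ∧ kv'.1 ≠ kv.1 := fun kv' h =>
            ⟨hsub kv' h, fun e => hnotin (e ▸ List.mem_map_of_mem h)⟩
          have hwlen : w.length ≤ n := by
            have : (c :: t).length = kv.1.length + w.length := by
              rw [← hw]; simp
            have hk1 : 1 ≤ kv.1.length := by
              cases hcase : kv.1 with
              | nil => exact absurd hcase hknil
              | cons a b => simp
            simp only [List.length_cons] at this hs
            omega
          calc compFrom citesB (c :: t)
              = compFrom (l₁ ++ kv :: l₂) (kv.1 ++ w) := by rw [← hsplit, ← hw]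
            _ = compFrom (kv :: l₂) (kv.1 ++ compFrom l₁ w) := by
                rw [compFrom_append, compFrom_keep hm hne₁]
            _ = compFrom l₂ (kv.2 ++ scanOne kv.1 kv.2 (compFrom l₁ w)) := by
                rw [compFrom_cons, scanOne_key kv.2 _ hknil]
            _ = kv.2 ++ compFrom l₂ (scanOne kv.1 kv.2 (compFrom l₁ w)) := by
                rw [compFrom_copy hsub₂ hrep]
            _ = kv.2 ++ compFrom (l₁ ++ kv :: l₂) w := by
                rw [compFrom_append, compFrom_cons]
            _ = kv.2 ++ scanGo w := by rw [← hsplit, ih w hwlen]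
            _ = scanGo (c :: t) := (scanGo_match hm (⟨w, hw⟩) w hw.symm).symm
        · have hex' : ∀ kv ∈ citesB, ¬ kv.1 <+: c :: t := fun kv hm hp => hex ⟨kv, hm, hp⟩
          rw [compFrom_nomatch (fun kv h => h) hex', scanGo_nomatch hex',
            ih t (by simpa using Nat.le_of_succ_le_succ hs)]
  exact fun s => main s.length s le_rfl

-- PySem.Chars.replace = scanOne
lemma replace_go_eq (old new : List Char) (ho : old ≠ []) :
    ∀ fuel l acc, l.length ≤ fuel →
      PySem.Chars.replace.go old new fuel l acc = acc.reverse ++ scanOne old new l := by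
  intro fuel
  induction fuel with
  | zero =>
    intro l acc hl
    rw [List.length_eq_zero_iff.1 (Nat.le_zero.1 hl)]
    rw [PySem.Chars.replace.go, scanOne_nil]
  | succ fuel ih =>
    intro l acc hl
    cases l with
    | nil =>
      rw [PySem.Chars.replace.go, scanOne_nil]
      · simp
      · omega
    | cons c t =>
      rw [PySem.Chars.replace.go]
      by_cases hp : old <+: c :: t
      · rw [if_pos (List.isPrefixOf_iff_prefix.2 hp)]
        have hdrop : (c :: t).drop old.length = t.drop (old.length - 1) := by
          obtain ⟨o, ot, rfl⟩ := List.exists_cons_of_ne_nil ho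
          simp
        have hlen : ((c :: t).drop old.length).length ≤ fuel := by
          simp only [List.length_drop, List.length_cons] at *
          have : 1 ≤ old.length := by
            obtain ⟨o, ot, rfl⟩ := List.exists_cons_of_ne_nil ho
            simp
          omega
        rw [ih _ _ hlen, hdrop, scanOne_pos new hp]
        simp
      · rw [if_neg (by simpa [List.isPrefixOf_iff_prefix] using hp)]
        rw [ih t (c :: acc) (by simpa using Nat.le_of_succ_le_succ hl), scanOne_neg new hp]
        simp

lemma replace_eq_scanOne (old new u : List Char) (ho : old ≠ []) :
    PySem.Chars.replace u old new = scanOne old new u := by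
  rw [PySem.Chars.replace]
  simp only [List.isEmpty_iff]
  rw [if_neg ho, replace_go_eq old new ho u.length u [] le_rfl]
  simp

-- A's string-level fold equals compFrom on the list side
set_option maxHeartbeats 1000000 in
lemma foldl_toList (ps : List (String × String))
    (hps : ∀ kv ∈ ps.map (fun kv => (kv.1.toList, kv.2.toList)), kv ∈ citesB) :
    ∀ s : String,
      (ps.foldl (fun s kv => if PySem.Str.isIn kv.1 s then PySem.Str.replace s kv.1 kv.2 else s) s).toList
        = compFrom (ps.map (fun kv => (kv.1.toList, kv.2.toList))) s.toList := by
  induction ps with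
  | nil => intro s; rfl
  | cons kv ps ih =>
    intro s
    have hm : (kv.1.toList, kv.2.toList) ∈ citesB := hps _ (by simp)
    have hknil : kv.1.toList ≠ [] := by
      obtain ⟨hh, -⟩ := fact_pairs _ hm
      intro h; rw [h] at hh; simp at hh
    have hstep : (if PySem.Str.isIn kv.1 s then PySem.Str.replace s kv.1 kv.2 else s).toList
        = scanOne kv.1.toList kv.2.toList s.toList := by
      by_cases hin : PySem.Str.isIn kv.1 s = true
      · rw [if_pos hin, PySem.Str.toList_replace, replace_eq_scanOne _ _ _ hknil]
      · rw [if_neg hin]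
        have hnin : ∀ j, ¬ kv.1.toList <+: s.toList.drop j := by
          intro j hpre
          have : PySem.Chars.isIn kv.1.toList s.toList = true :=
            (PySem.Chars.exists_prefix_drop_iff_isIn _ _).1 ⟨j, hpre⟩
          rw [PySem.Str.isIn_eq] at hin
          exact hin this
        exact (scanOne_id hnin).symm
    rw [List.foldl_cons, List.map_cons, compFrom_cons]
    rw [ih (fun kv' h => hps kv' (by rw [List.map_cons]; exact List.mem_cons_of_mem _ h)) _, hstep]

set_option maxHeartbeats 1000000 in
lemma replace_cites_toList (s : String) :
    (replace_cites s).toList = compFrom citesB s.toList := by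
  rw [replace_cites, citesB_eq_map]
  exact foldl_toList citeDic (by rw [← citesB_eq_map]; exact fun kv h => h) s

-- ===== VERDICT (by name: the statement is the Claim_ definition above) =====
theorem replace_cites_spec : Claim_equal_replace_cites := by
  intro s _
  unfold Spec_replace_cites replace_cites_alt
  rw [← String.toList_inj, String.toList_ofList, replace_cites_toList, compFrom_eq_scanGo]
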